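-- pv_equiv track=rewrite | github.com/mohenjo/codingdojang | CodingDojang/LargestSubset/CD059.py | get_largest_subset
-- ===== SOURCE A (Python) =====
-- def get_largest_subset(arr: list):
--     max_subset = []
--     cur_subset = []
--     while arr:
--         cur_val = min(arr)
--         arr.pop(arr.index(cur_val))
--         if cur_subset == [] or cur_val == cur_subset[-1] or cur_val == cur_subset[-1] + 1:
--             cur_subset.append(cur_val)
--             if len(cur_subset) > len(max_subset):
--                 max_subset = cur_subset
--         else:
--             cur_subset = [cur_val]
--
--     return max_subset
-- ===== SOURCE B (Python) =====
-- def get_largest_subset(arr: list):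
--     s = sorted(arr)
--     if not s:
--         return []
--     best_start, best_len, start = 0, 1, 0
--     for i in range(1, len(s)):
--         if s[i] - s[i - 1] > 1:
--             start = i
--         if i - start + 1 > best_len:
--             best_len = i - start + 1
--             best_start = start
--     return s[best_start:best_start + best_len]
-- ===== Notes on version B (the rewrite author's own statement) =====
-- stated objective: faster
-- what changed: A repeatedly finds min(arr) and pops it (quadratic selection loop, mutating arr); B sorts the list once and does a single index scan tracking the current run start and the best (start, length), returning a slice.
import Mathlib
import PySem

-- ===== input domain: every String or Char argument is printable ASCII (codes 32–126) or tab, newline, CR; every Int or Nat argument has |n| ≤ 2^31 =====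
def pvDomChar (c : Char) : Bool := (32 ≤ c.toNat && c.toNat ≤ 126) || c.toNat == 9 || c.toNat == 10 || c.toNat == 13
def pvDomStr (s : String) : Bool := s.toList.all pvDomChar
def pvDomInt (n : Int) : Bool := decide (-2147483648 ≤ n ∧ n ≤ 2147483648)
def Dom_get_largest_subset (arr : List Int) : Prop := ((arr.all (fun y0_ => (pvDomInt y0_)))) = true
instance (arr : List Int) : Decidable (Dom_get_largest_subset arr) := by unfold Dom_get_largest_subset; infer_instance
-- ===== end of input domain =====

-- B sorts once and scans linearly instead of A's repeated min+pop (a timing run measures the speed-up).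
-- A empties its argument list in place (pop in a loop); B does not mutate — the equivalence proved is about the return value.


-- ===== PORT A =====
-- The while loop of A: state (arr, cur_subset, max_subset).
-- Python's 'max_subset = cur_subset' aliases the two lists, so later appends to cur_subset
-- also grow max_subset without the 'len >' test firing; with value semantics the observable
-- state is reproduced exactly by re-assigning max_subset whenever cur_subset got strictly longer.
def glsLoop : List Int → List Int → List Int → List Int
  | [], _, maxs => maxs
  | x :: t, cur, maxs =>
    -- cur_val = min(arr): min with no key is the running-min fold (PySem.List.min?_id_cons)
    let v := t.foldl min x
    -- arr.pop(arr.index(cur_val)) removes the FIRST occurrence of v, i.e. List.erase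
    -- (PySem.List.index? = idxOf?, PySem.List.pop? at that index; v ∈ arr so no exception)
    let arr' := (x :: t).erase v
    have hv : v ∈ x :: t := by
      rcases PySem.List.foldl_min_mem t x with h | h
      · simp [v, h]
      · simp [v]; right; exact h
    have hdec : arr'.length < (x :: t).length := by
      have := List.length_erase_of_mem hv
      simp only [arr', this, List.length_cons]
      omega
    if cur = [] ∨ v = PySem.List.pyGetD cur (-1) 0 ∨ v = PySem.List.pyGetD cur (-1) 0 + 1 then
      let cur' := cur ++ [v]
      glsLoop arr' cur' (if maxs.length < cur'.length then cur' else maxs)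
    else
      glsLoop arr' [v] maxs
  termination_by a _ _ => a.length
  decreasing_by all_goals exact hdec

def get_largest_subset (arr : List Int) : List Int := glsLoop arr [] []

-- ===== PORT B =====
-- body of B's for loop: state (best_start, best_len, start), index i
def bstep (s : List Int) (acc : Int × Int × Int) (i : Int) : Int × Int × Int :=
  let bs := acc.1
  let bl := acc.2.1
  let st := acc.2.2
  let st' := if PySem.List.pyGetD s i 0 - PySem.List.pyGetD s (i - 1) 0 > 1 then i else st
  if i - st' + 1 > bl then (st', i - st' + 1, st') else (bs, bl, st')

def get_largest_subset_alt (arr : List Int) : List Int :=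
  let s := PySem.List.sorted arr (fun x => x) false
  if s = [] then []
  else
    let r := (PySem.List.pyRange 1 (s.length : Int) 1).foldl (bstep s) (0, 1, 0)
    PySem.List.slice s (some r.1) (some (r.1 + r.2.1))

-- ===== PRECONDITION & SPEC =====
def Spec_get_largest_subset (arr : List Int) (out : List Int) : Prop := out = get_largest_subset_alt arr
instance (arr : List Int) (out : List Int) : Decidable (Spec_get_largest_subset arr out) := by unfold Spec_get_largest_subset; infer_instance

-- ===== CLAIM (what is proved, stated in full; the proofs are below) =====
def Claim_equal_get_largest_subset : Prop := ∀ (arr : List Int), Dom_get_largest_subset arr → Spec_get_largest_subset arr (get_largest_subset arr)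

-- ===== LEMMAS AND PROOFS =====

-- A's loop, re-expressed over the already-sorted list: at each step the head IS the minimum.
def glsScan : List Int → List Int → List Int → List Int
  | [], _, maxs => maxs
  | v :: rest, cur, maxs =>
    if cur = [] ∨ v = PySem.List.pyGetD cur (-1) 0 ∨ v = PySem.List.pyGetD cur (-1) 0 + 1 then
      let cur' := cur ++ [v]
      glsScan rest cur' (if maxs.length < cur'.length then cur' else maxs)
    else
      glsScan rest [v] maxs

-- pulling the minimum out front commutes with sorting
lemma sorted_cons_min (x : Int) (t : List Int) :
    PySem.List.sorted (x :: t) (fun y => y) false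
      = t.foldl min x :: PySem.List.sorted ((x :: t).erase (t.foldl min x)) (fun y => y) false := by
  set v := t.foldl min x with hv
  have hvmem : v ∈ x :: t := by
    rcases PySem.List.foldl_min_mem t x with h | h
    · simp [hv, h]
    · simp [hv]; right; exact h
  apply PySem.List.sorted_id_eq_of_perm_of_pairwise
  · exact ((PySem.List.sorted_perm _ _ _).cons v).trans (List.perm_cons_erase hvmem).symm
  · refine List.pairwise_cons.mpr ⟨?_, ?_⟩
    · intro y hy
      have hy' : y ∈ x :: t :=
        List.mem_of_mem_erase ((PySem.List.mem_sorted _ _ _ _).mp hy)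
      rcases List.mem_cons.mp hy' with rfl | hyt
      · exact (PySem.List.foldl_min_le t y).1
      · exact (PySem.List.foldl_min_le t x).2 y hyt
    · simpa using PySem.List.sorted_pairwise ((x :: t).erase v) (fun y => y)

lemma glsLoop_eq_scan : ∀ (arr cur maxs : List Int),
    glsLoop arr cur maxs = glsScan (PySem.List.sorted arr (fun y => y) false) cur maxs := by
  have H : ∀ (n : Nat) (arr : List Int), arr.length ≤ n → ∀ cur maxs,
      glsLoop arr cur maxs = glsScan (PySem.List.sorted arr (fun y => y) false) cur maxs := by
    intro n
    induction n with
    | zero =>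
      intro arr h cur maxs
      have : arr = [] := List.eq_nil_of_length_eq_zero (by omega)
      subst this
      rw [glsLoop, show PySem.List.sorted ([] : List Int) (fun y => y) false = [] from rfl]
      rfl
    | succ n ih =>
      intro arr h cur maxs
      match arr with
      | [] =>
        rw [glsLoop, show PySem.List.sorted ([] : List Int) (fun y => y) false = [] from rfl]
        rfl
      | x :: t =>
        rw [sorted_cons_min]
        rw [glsLoop]
        simp only [glsScan]
        have hvmem : t.foldl min x ∈ x :: t := by
          rcases PySem.List.foldl_min_mem t x with hm | hm
          · simp [hm]
          · simp; right; exact hm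
        have harr' : ((x :: t).erase (t.foldl min x)).length ≤ n := by
          have := List.length_erase_of_mem hvmem
          simp only [this, List.length_cons]
          simp at h
          omega
        split
        · exact ih _ harr' _ _
        · exact ih _ harr' _ _
  intro arr cur maxs
  exact H arr.length arr le_rfl cur maxs

-- the run/best invariant tying A's scan state to B's index fold
lemma scan_eq_fold (s : List Int) (hs : s.Pairwise (· ≤ ·)) :
    ∀ (k m bs bl st : Nat), m + k = s.length → 1 ≤ m → st < m → bs + bl ≤ m → 1 ≤ bl →
    glsScan (s.drop m) ((s.drop st).take (m - st)) ((s.drop bs).take bl)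
      = (let r := (PySem.List.pyRange (m : Int) (s.length : Int) 1).foldl (bstep s) ((bs : Int), (bl : Int), (st : Int));
         PySem.List.slice s (some r.1) (some (r.1 + r.2.1))) := by
  intro k
  induction k with
  | zero =>
    intro m bs bl st hmk hm hst hbsbl hbl
    have hm' : m = s.length := by omega
    subst hm'
    simp only [PySem.List.pyRange_one_eq_nil le_rfl, List.foldl_nil, List.drop_length]
    rw [PySem.List.slice_natCast_add]
    rfl
  | succ k ih =>
    intro m bs bl st hmk hm hst hbsbl hbl
    have hmn : m < s.length := by omega
    have hm1 : m - 1 < s.length := by omega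
    set a := s[m-1]'hm1 with ha
    set b := s[m]'hmn with hb
    have hab : a ≤ b := List.pairwise_iff_getElem.mp hs (m-1) m hm1 hmn (by omega)
    have hgetm : PySem.List.pyGetD s ((m : Nat) : Int) 0 = b := by
      rw [PySem.List.pyGetD_natCast]
      exact List.getD_eq_getElem s 0 hmn
    have hgetm1 : PySem.List.pyGetD s (((m : Nat) : Int) - 1) 0 = a := by
      rw [show ((m : Int) - 1) = ((m - 1 : Nat) : Int) by omega, PySem.List.pyGetD_natCast]
      exact List.getD_eq_getElem s 0 hm1
    have hcurlen : ((s.drop st).take (m - st)).length = m - st := by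
      simp only [List.length_take, List.length_drop]
      omega
    have hcur : (s.drop st).take (m - st) ≠ [] := by
      intro hnil
      rw [hnil] at hcurlen
      simp at hcurlen
      omega
    have hlast : PySem.List.pyGetD ((s.drop st).take (m - st)) (-1) 0 = a := by
      rw [PySem.List.pyGetD_neg_one _ _ hcur, List.getLast_eq_getElem]
      have h1 : ((s.drop st).take (m - st)).length - 1 = m - st - 1 := by omega
      simp only [h1]
      rw [List.getElem_take, List.getElem_drop]
      have h2 : st + (m - st - 1) = m - 1 := by omega
      simp only [h2]
      rfl
    have hdropm : s.drop m = b :: s.drop (m+1) := List.drop_eq_getElem_cons hmn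
    have hcons : (s.drop st).take (m - st) ++ [b] = (s.drop st).take (m + 1 - st) := by
      have h1 : m + 1 - st = (m - st) + 1 := by omega
      rw [h1, List.take_add_one]
      have h2 : (s.drop st)[m - st]? = some b := by
        rw [List.getElem?_eq_getElem (by simp only [List.length_drop]; omega)]
        rw [List.getElem_drop]
        have h3 : st + (m - st) = m := by omega
        simp only [h3]
        rfl
      rw [h2]
      rfl
    rw [PySem.List.pyRange_one_cons (by exact_mod_cast hmn), List.foldl_cons]
    rw [hdropm]
    by_cases hgap : b - a > 1
    · -- gap: A starts a new run; B moves start and best cannot improve (bl ≥ 1)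
      have hbstep : bstep s (((bs : Nat) : Int), ((bl : Nat) : Int), ((st : Nat) : Int)) ((m : Nat) : Int)
          = (((bs : Nat) : Int), ((bl : Nat) : Int), ((m : Nat) : Int)) := by
        simp only [bstep, hgetm, hgetm1]
        rw [if_pos hgap, if_neg (by omega)]
      rw [hbstep]
      simp only [glsScan]
      rw [if_neg (by
        push Not
        refine ⟨hcur, ?_, ?_⟩ <;> · rw [hlast]; omega)]
      have h1 : [b] = (s.drop m).take (m + 1 - m) := by
        rw [hdropm]
        simp
      rw [h1]
      have := ih (m+1) bs bl m (by omega) (by omega) (by omega) (by omega) hbl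
      push_cast at this ⊢
      exact this
    · -- no gap: the run continues (a ≤ b ≤ a+1)
      have hcond : b = a ∨ b = a + 1 := by omega
      have hbstep : bstep s (((bs : Nat) : Int), ((bl : Nat) : Int), ((st : Nat) : Int)) ((m : Nat) : Int)
          = (if ((m : Int) - st + 1 > (bl : Int)) then (((st : Nat) : Int), (m : Int) - st + 1, ((st : Nat) : Int))
             else (((bs : Nat) : Int), ((bl : Nat) : Int), ((st : Nat) : Int))) := by
        simp only [bstep, hgetm, hgetm1]
        rw [if_neg hgap]
      rw [hbstep]
      simp only [glsScan]
      rw [if_pos (by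
        right
        rw [hlast]
        omega)]
      simp only [hcons]
      have hmaxlen : ((s.drop bs).take bl).length = bl := by
        simp only [List.length_take, List.length_drop]
        omega
      have hcurlen' : ((s.drop st).take (m + 1 - st)).length = m + 1 - st := by
        simp only [List.length_take, List.length_drop]
        omega
      by_cases hbetter : bl < m + 1 - st
      · rw [if_pos (by rw [hmaxlen, hcurlen']; exact hbetter)]
        rw [if_pos (by omega)]
        have := ih (m+1) st (m + 1 - st) st (by omega) (by omega) (by omega) (by omega) (by omega)
        have hc : ((m + 1 - st : Nat) : Int) = (m : Int) - (st : Int) + 1 := by omega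
        rw [hc] at this
        push_cast at this ⊢
        exact this
      · rw [if_neg (by rw [hmaxlen, hcurlen']; exact hbetter)]
        rw [if_neg (by omega)]
        have := ih (m+1) bs bl st (by omega) (by omega) (by omega) (by omega) hbl
        push_cast at this ⊢
        exact this

-- ===== VERDICT (by name: the statement is the Claim_ definition above) =====
theorem get_largest_subset_spec : Claim_equal_get_largest_subset := by
  intro arr _
  unfold Spec_get_largest_subset get_largest_subset get_largest_subset_alt
  rw [glsLoop_eq_scan]
  set s := PySem.List.sorted arr (fun y => y) false with hsdef
  by_cases hnil : s = []
  · simp [hnil, glsScan]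
  · have hs : s.Pairwise (· ≤ ·) := by
      simpa [hsdef] using PySem.List.sorted_pairwise arr (fun y => y)
    obtain ⟨x, t, hxt⟩ := List.exists_cons_of_ne_nil hnil
    have hlen : 1 ≤ s.length := by rw [hxt]; simp
    have h1 : glsScan s [] [] = glsScan (s.drop 1) ((s.drop 0).take (1 - 0)) ((s.drop 0).take 1) := by
      rw [hxt]; simp [glsScan]
    rw [h1, scan_eq_fold s hs (s.length - 1) 1 0 1 0 (by omega) (by omega) (by omega) (by omega) (by omega)]
    simp [hnil]
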